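-- pv_equiv track=rewrite | github.com/zcxcz/isp-csiir | hls/run_hls_realtime_verification.py | _grad_inverse_remap
-- ===== SOURCE A (Python) =====
-- from typing import List, Dict, Tuple, Optional, Set
--
-- def _grad_inverse_remap(g: List[int]) -> List[int]:
--     """Inverse remap of gradients"""
--     idx = list(range(5))
--     for i in range(4):
--         for j in range(4 - i):
--             if g[idx[j]] < g[idx[j + 1]]:
--                 idx[j], idx[j + 1] = idx[j + 1], idx[j]
--     inv = [0] * 5
--     for i in range(5):
--         inv[idx[4 - i]] = g[idx[i]]
--     return inv
-- ===== SOURCE B (Python) =====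
-- def _grad_inverse_remap(g):
--     """Inverse remap of gradients (rank-counting, no sort)."""
--     # descending stable rank: number of positions that come before p
--     # in the order (gradient descending, original index ascending)
--     rank = [sum(1 for q in range(5) if g[q] > g[p] or (g[q] == g[p] and q < p))
--             for p in range(5)]
--     order = [0] * 5
--     for p in range(5):
--         order[rank[p]] = p
--     inv = [0] * 5
--     for i in range(5):
--         inv[order[4 - i]] = g[order[i]]
--     return inv
-- ===== Notes on version B (the rewrite author's own statement) =====
-- stated objective: alternative
-- what changed: Replaces A's two-pass bubble sort of the index array by a direct stable descending rank count per position (rank = #greater gradients + #equal gradients at earlier indices), builds the order array from those ranks, then applies the same mirror remap.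
import Mathlib
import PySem

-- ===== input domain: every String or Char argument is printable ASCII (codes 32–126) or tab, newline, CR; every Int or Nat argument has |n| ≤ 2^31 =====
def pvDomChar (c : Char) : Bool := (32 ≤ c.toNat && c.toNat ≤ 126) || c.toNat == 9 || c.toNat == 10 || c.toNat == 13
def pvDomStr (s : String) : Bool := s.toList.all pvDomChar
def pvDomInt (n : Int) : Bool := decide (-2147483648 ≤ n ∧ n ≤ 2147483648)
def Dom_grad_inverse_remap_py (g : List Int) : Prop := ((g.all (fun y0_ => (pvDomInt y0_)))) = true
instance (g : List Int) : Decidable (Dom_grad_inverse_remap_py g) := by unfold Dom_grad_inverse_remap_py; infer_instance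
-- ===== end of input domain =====

-- B replaces A's stable bubble sort of the 5 indices by a direct rank count; objective: alternative.

-- value accessor: v i = g[i] for i in 0..4 (the only indices either Python reads on Pre_);
-- the five gradients are read once via PySem.List.pyGetD (exact for len(g) ≥ 5, i.e. on Pre_)
def pvVf (a b c d e i : Int) : Int :=
  if i = 0 then a else if i = 1 then b else if i = 2 then c else if i = 3 then d else e

-- ===== PORT A =====
-- bubble sort of idx = list(range(5)): for i in range(4): for j in range(4-i): swap if g[idx[j]] < g[idx[j+1]]
def pvAIdx (v : Int → Int) : List Int :=
  (PySem.List.pyRange 0 4 1).foldl (fun idx i =>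
    (PySem.List.pyRange 0 (4 - i) 1).foldl (fun idx j =>
      if v (PySem.List.pyGetD idx j 0) < v (PySem.List.pyGetD idx (j + 1) 0) then
        PySem.List.pySetD (PySem.List.pySetD idx j (PySem.List.pyGetD idx (j + 1) 0)) (j + 1)
          (PySem.List.pyGetD idx j 0)
      else idx) idx)
    (PySem.List.pyRange 0 5 1)

-- final loop (textually identical in both Pythons): inv = [0]*5; for i in range(5): inv[idx[4-i]] = g[idx[i]]
def pvAsm (v : Int → Int) (idx : List Int) : List Int :=
  (PySem.List.pyRange 0 5 1).foldl (fun inv i =>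
    PySem.List.pySetD inv (PySem.List.pyGetD idx (4 - i) 0) (v (PySem.List.pyGetD idx i 0)))
    (List.replicate 5 0)

def grad_inverse_remap_py (g : List Int) : List Int :=
  pvAsm
    (pvVf (PySem.List.pyGetD g 0 0) (PySem.List.pyGetD g 1 0) (PySem.List.pyGetD g 2 0)
      (PySem.List.pyGetD g 3 0) (PySem.List.pyGetD g 4 0))
    (pvAIdx
      (pvVf (PySem.List.pyGetD g 0 0) (PySem.List.pyGetD g 1 0) (PySem.List.pyGetD g 2 0)
        (PySem.List.pyGetD g 3 0) (PySem.List.pyGetD g 4 0)))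

-- ===== PORT B =====
-- rank[p] = sum(1 for q in range(5) if g[q] > g[p] or (g[q] == g[p] and q < p))
-- (Python's 'g[q] > g[p]' is written 'v p < v q')
def pvRankAt (v : Int → Int) (p : Int) : Int :=
  (PySem.List.pyRange 0 5 1).foldl
    (fun acc q => if v p < v q ∨ (v q = v p ∧ q < p) then acc + 1 else acc) 0

-- order = [0]*5; for p in range(5): order[rank[p]] = p
def pvOrder (v : Int → Int) : List Int :=
  (PySem.List.pyRange 0 5 1).foldl
    (fun ord p =>
      PySem.List.pySetD ord
        (PySem.List.pyGetD ((PySem.List.pyRange 0 5 1).map (fun p => pvRankAt v p)) p 0) p)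
    (List.replicate 5 0)

def grad_inverse_remap_py_alt (g : List Int) : List Int :=
  pvAsm
    (pvVf (PySem.List.pyGetD g 0 0) (PySem.List.pyGetD g 1 0) (PySem.List.pyGetD g 2 0)
      (PySem.List.pyGetD g 3 0) (PySem.List.pyGetD g 4 0))
    (pvOrder
      (pvVf (PySem.List.pyGetD g 0 0) (PySem.List.pyGetD g 1 0) (PySem.List.pyGetD g 2 0)
        (PySem.List.pyGetD g 3 0) (PySem.List.pyGetD g 4 0)))

-- ===== PRECONDITION & SPEC =====
-- Python A raises IndexError (at g[idx[j]]) exactly when g has fewer than 5 elements; both Pythons read only g[0..4]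
def Pre_grad_inverse_remap_py (g : List Int) : Prop := 5 ≤ g.length
instance (g : List Int) : Decidable (Pre_grad_inverse_remap_py g) := by
  unfold Pre_grad_inverse_remap_py; infer_instance

def pvWitness_grad_inverse_remap_py : List Int := [3, 1, 4, 1, 5]

def Spec_grad_inverse_remap_py (g : List Int) (out : List Int) : Prop := out = grad_inverse_remap_py_alt g
instance (g : List Int) (out : List Int) : Decidable (Spec_grad_inverse_remap_py g out) := by unfold Spec_grad_inverse_remap_py; infer_instance

-- ===== CLAIM (what is proved, stated in full; the proofs are below) =====
def Claim_equal_grad_inverse_remap_py : Prop := ∀ (g : List Int), Dom_grad_inverse_remap_py g → Pre_grad_inverse_remap_py g → Spec_grad_inverse_remap_py g (grad_inverse_remap_py g)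

-- ===== LEMMAS AND PROOFS =====

-- rank of a value x among the five gradients: how many of them are strictly below x
def pvRk (a b c d e x : Int) : Int :=
  (if a < x then 1 else 0) + (if b < x then 1 else 0) + (if c < x then 1 else 0) +
    (if d < x then 1 else 0) + (if e < x then 1 else 0)

-- rank vectors are fixed points of ranking; used to prune the finite check to actual rank profiles
def pvChk (a b c d e : Int) : Bool :=
  (pvRk a b c d e a == a) && (pvRk a b c d e b == b) && (pvRk a b c d e c == c) &&
    (pvRk a b c d e d == d) && (pvRk a b c d e e == e)

lemma pvInd_mono (t x y : Int) (h : x ≤ y) :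
    (if t < x then (1 : Int) else 0) ≤ (if t < y then (1 : Int) else 0) := by
  split_ifs <;> omega

lemma pvRk_mono (a b c d e x y : Int) (h : x ≤ y) : pvRk a b c d e x ≤ pvRk a b c d e y := by
  unfold pvRk
  have h1 := pvInd_mono a x y h
  have h2 := pvInd_mono b x y h
  have h3 := pvInd_mono c x y h
  have h4 := pvInd_mono d x y h
  have h5 := pvInd_mono e x y h
  linarith

lemma pvRk_strict_fst (a b c d e y : Int) (h : a < y) :
    pvRk a b c d e a < pvRk a b c d e y := by
  unfold pvRk
  have h1 : (if a < a then (1 : Int) else 0) = 0 := by simp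
  have h1' : (if a < y then (1 : Int) else 0) = 1 := by simp [h]
  have h2 := pvInd_mono b a y h.le
  have h3 := pvInd_mono c a y h.le
  have h4 := pvInd_mono d a y h.le
  have h5 := pvInd_mono e a y h.le
  linarith

lemma pvRk_strict (a b c d e x y : Int)
    (hx : x = a ∨ x = b ∨ x = c ∨ x = d ∨ x = e) (h : x < y) :
    pvRk a b c d e x < pvRk a b c d e y := by
  have e2 : ∀ z, pvRk a b c d e z = pvRk b a c d e z := fun z => by unfold pvRk; ring
  have e3 : ∀ z, pvRk a b c d e z = pvRk c b a d e z := fun z => by unfold pvRk; ring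
  have e4 : ∀ z, pvRk a b c d e z = pvRk d b c a e z := fun z => by unfold pvRk; ring
  have e5 : ∀ z, pvRk a b c d e z = pvRk e b c d a z := fun z => by unfold pvRk; ring
  rcases hx with rfl | rfl | rfl | rfl | rfl
  · exact pvRk_strict_fst _ _ _ _ _ _ h
  · rw [e2, e2]; exact pvRk_strict_fst _ _ _ _ _ _ h
  · rw [e3, e3]; exact pvRk_strict_fst _ _ _ _ _ _ h
  · rw [e4, e4]; exact pvRk_strict_fst _ _ _ _ _ _ h
  · rw [e5, e5]; exact pvRk_strict_fst _ _ _ _ _ _ h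

lemma pvRk_lt_iff (a b c d e x y : Int)
    (hx : x = a ∨ x = b ∨ x = c ∨ x = d ∨ x = e) :
    x < y ↔ pvRk a b c d e x < pvRk a b c d e y := by
  constructor
  · exact pvRk_strict a b c d e x y hx
  · intro h
    by_contra hle
    exact absurd (pvRk_mono a b c d e y x (by omega)) (by omega)

lemma pvRk_eq_iff (a b c d e x y : Int)
    (hx : x = a ∨ x = b ∨ x = c ∨ x = d ∨ x = e)
    (hy : y = a ∨ y = b ∨ y = c ∨ y = d ∨ y = e) :
    x = y ↔ pvRk a b c d e x = pvRk a b c d e y := by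
  constructor
  · rintro rfl; rfl
  · intro h
    rcases lt_trichotomy x y with hlt | heq | hgt
    · exact absurd ((pvRk_lt_iff a b c d e x y hx).mp hlt) (by omega)
    · exact heq
    · exact absurd ((pvRk_lt_iff a b c d e y x hy).mp hgt) (by omega)

lemma pvRk_bounds (a b c d e x : Int) (hx : x = a ∨ x = b ∨ x = c ∨ x = d ∨ x = e) :
    0 ≤ pvRk a b c d e x ∧ pvRk a b c d e x ≤ 4 := by
  unfold pvRk; rcases hx with rfl | rfl | rfl | rfl | rfl <;> split_ifs <;> omega

-- comparisons of accessor values are preserved when the five gradients are replaced by their ranks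
lemma pvVf_lt_iff (a b c d e : Int) (X Y : Int) :
    pvVf a b c d e X < pvVf a b c d e Y ↔
      pvVf (pvRk a b c d e a) (pvRk a b c d e b) (pvRk a b c d e c) (pvRk a b c d e d)
          (pvRk a b c d e e) X <
        pvVf (pvRk a b c d e a) (pvRk a b c d e b) (pvRk a b c d e c) (pvRk a b c d e d)
          (pvRk a b c d e e) Y := by
  unfold pvVf
  split_ifs <;> exact pvRk_lt_iff a b c d e _ _ (by tauto)

lemma pvVf_eq_iff (a b c d e : Int) (X Y : Int) :
    pvVf a b c d e X = pvVf a b c d e Y ↔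
      pvVf (pvRk a b c d e a) (pvRk a b c d e b) (pvRk a b c d e c) (pvRk a b c d e d)
          (pvRk a b c d e e) X =
        pvVf (pvRk a b c d e a) (pvRk a b c d e b) (pvRk a b c d e c) (pvRk a b c d e d)
          (pvRk a b c d e e) Y := by
  unfold pvVf
  split_ifs <;> exact pvRk_eq_iff a b c d e _ _ (by tauto) (by tauto)

-- invariance of the bubble-sorted index list under the rank replacement
lemma pvAIdx_inv (a b c d e : Int) :
    pvAIdx (pvVf a b c d e) =
      pvAIdx
        (pvVf (pvRk a b c d e a) (pvRk a b c d e b) (pvRk a b c d e c) (pvRk a b c d e d)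
          (pvRk a b c d e e)) := by
  unfold pvAIdx
  simp only [pvVf_lt_iff a b c d e]

-- invariance of B's order list under the rank replacement
lemma pvOrder_inv (a b c d e : Int) :
    pvOrder (pvVf a b c d e) =
      pvOrder
        (pvVf (pvRk a b c d e a) (pvRk a b c d e b) (pvRk a b c d e c) (pvRk a b c d e d)
          (pvRk a b c d e e)) := by
  unfold pvOrder pvRankAt
  simp only [pvVf_lt_iff a b c d e, pvVf_eq_iff a b c d e]

-- ranking a rank vector gives it back (so rank vectors pass pvChk)
lemma pvRk_fix (a b c d e x : Int) :
    pvRk (pvRk a b c d e a) (pvRk a b c d e b) (pvRk a b c d e c) (pvRk a b c d e d)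
        (pvRk a b c d e e) (pvRk a b c d e x) = pvRk a b c d e x := by
  have expand : ∀ p q r s t z : Int, pvRk p q r s t z =
      (if p < z then (1 : Int) else 0) + (if q < z then 1 else 0) + (if r < z then 1 else 0) +
        (if s < z then 1 else 0) + (if t < z then 1 else 0) := fun _ _ _ _ _ _ => rfl
  have ind : ∀ w : Int, (w = a ∨ w = b ∨ w = c ∨ w = d ∨ w = e) →
      (if pvRk a b c d e w < pvRk a b c d e x then (1 : Int) else 0) =
        (if w < x then (1 : Int) else 0) := by
    intro w hw
    by_cases h : w < x
    · rw [if_pos ((pvRk_lt_iff a b c d e w x hw).mp h), if_pos h]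
    · rw [if_neg (fun hc => h ((pvRk_lt_iff a b c d e w x hw).mpr hc)), if_neg h]
  rw [expand (pvRk a b c d e a) (pvRk a b c d e b) (pvRk a b c d e c) (pvRk a b c d e d)
      (pvRk a b c d e e) (pvRk a b c d e x),
    ind a (by tauto), ind b (by tauto), ind c (by tauto), ind d (by tauto), ind e (by tauto),
    <- expand a b c d e x]

-- the two orders agree on every rank vector (finite kernel check, pruned by pvChk)
set_option maxRecDepth 400000 in
set_option maxHeartbeats 2000000 in
lemma pvFin :
    ∀ a < 5, ∀ b < 5, ∀ c < 5, ∀ d < 5, ∀ e < 5,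
      (pvChk (a : Nat) (b : Nat) (c : Nat) (d : Nat) (e : Nat) &&
        !(decide (pvAIdx (pvVf (a : Nat) (b : Nat) (c : Nat) (d : Nat) (e : Nat)) =
            pvOrder (pvVf (a : Nat) (b : Nat) (c : Nat) (d : Nat) (e : Nat))))) = false := by
  decide

lemma pvMain (a b c d e : Int) : pvAIdx (pvVf a b c d e) = pvOrder (pvVf a b c d e) := by
  have ba := pvRk_bounds a b c d e a (by tauto)
  have bb := pvRk_bounds a b c d e b (by tauto)
  have bc := pvRk_bounds a b c d e c (by tauto)
  have bd := pvRk_bounds a b c d e d (by tauto)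
  have be := pvRk_bounds a b c d e e (by tauto)
  have hca : ((pvRk a b c d e a).toNat : Int) = pvRk a b c d e a := by omega
  have hcb : ((pvRk a b c d e b).toNat : Int) = pvRk a b c d e b := by omega
  have hcc : ((pvRk a b c d e c).toNat : Int) = pvRk a b c d e c := by omega
  have hcd : ((pvRk a b c d e d).toNat : Int) = pvRk a b c d e d := by omega
  have hce : ((pvRk a b c d e e).toNat : Int) = pvRk a b c d e e := by omega
  have hfin := pvFin (pvRk a b c d e a).toNat (by omega) (pvRk a b c d e b).toNat (by omega)
    (pvRk a b c d e c).toNat (by omega) (pvRk a b c d e d).toNat (by omega)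
    (pvRk a b c d e e).toNat (by omega)
  rw [hca, hcb, hcc, hcd, hce] at hfin
  have hchk : pvChk (pvRk a b c d e a) (pvRk a b c d e b) (pvRk a b c d e c) (pvRk a b c d e d)
      (pvRk a b c d e e) = true := by
    simp [pvChk, pvRk_fix]
  rw [hchk, Bool.true_and, Bool.not_eq_false'] at hfin
  have heq := of_decide_eq_true hfin
  rw [pvAIdx_inv a b c d e, pvOrder_inv a b c d e]
  exact heq

-- ===== VERDICT (by name: the statement is the Claim_ definition above) =====
theorem grad_inverse_remap_py_spec : Claim_equal_grad_inverse_remap_py := by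
  intro g _ _
  unfold Spec_grad_inverse_remap_py grad_inverse_remap_py grad_inverse_remap_py_alt
  rw [pvMain]
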